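-- pv_equiv track=rewrite | github.com/kacperkrolak/advent-of-code | day7.py | increment_operators
-- ===== SOURCE A (Python) =====
-- def increment_operators(operators: list[str]) -> bool:
--     for i in range(len(operators) -1, -1, -1):
--         if operators[i] == "+":
--             operators[i] = "*"
--
--             for j in range(i + 1, len(operators)):
--                 operators[j] = "+"
--             return True
--
--     return False
-- ===== SOURCE B (Python) =====
-- def increment_operators(operators: list[str]) -> bool:
--     # Arithmetic view: the list is a binary number ("+" = 0, "*" = 1, last element
--     # least significant).  Encode it, add one, and if that does not overflow the
--     # width, decode the new number back into the list.
--     n = 0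
--     for op in operators:
--         n = n * 2 + (0 if op == "+" else 1)
--     n += 1
--     if n >> len(operators):        # overflow: the number was all ones
--         return False
--     for i in range(len(operators) - 1, -1, -1):
--         operators[i] = "*" if n & 1 else "+"
--         n >>= 1
--     return True
-- ===== Notes on version B (the rewrite author's own statement) =====
-- stated objective: alternative
-- what changed: B encodes the operator list as one binary integer ('+'=0, '*'=1), adds one arithmetically, detects overflow with a shift, and decodes the incremented number back into the list, instead of A's in-place scan for the last '+' with a nested reset loop; it trades speed on very long lists (big-integer carries) for an arithmetic formulation.
import Mathlib
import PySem

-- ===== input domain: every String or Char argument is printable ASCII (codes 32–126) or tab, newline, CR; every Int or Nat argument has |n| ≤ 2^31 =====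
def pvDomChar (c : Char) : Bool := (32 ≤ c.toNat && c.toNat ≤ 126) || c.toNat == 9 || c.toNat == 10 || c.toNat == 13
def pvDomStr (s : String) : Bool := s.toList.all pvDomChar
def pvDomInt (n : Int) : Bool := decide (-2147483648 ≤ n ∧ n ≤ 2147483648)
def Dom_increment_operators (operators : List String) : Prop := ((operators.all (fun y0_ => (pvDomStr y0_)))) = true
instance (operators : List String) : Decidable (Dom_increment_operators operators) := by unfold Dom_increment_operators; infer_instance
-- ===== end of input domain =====

-- B treats the list as a binary number: encode ('+'=0,'*'=1), add one, shift-test for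
-- overflow, decode back — instead of A's find-the-last-'+' scan with a nested reset loop.
-- Both Pythons mutate the list in place; the equivalence proved here is about the RETURN
-- value only (the mutations coincide on lists whose elements are all "+" or "*").


-- ===== PORT A =====
-- backward for-loop 'for i in range(len-1,-1,-1)': n counts how many indices remain,
-- the current index is n-1; the in-place mutation does not affect the return value.
def goA_increment (ops : List String) : Nat → Bool
  | 0 => false
  | n + 1 => if ops[n]? = some "+" then true else goA_increment ops n

def increment_operators (operators : List String) : Bool :=
  goA_increment operators operators.length

-- ===== PORT B =====
-- Source B: encode the list as a binary number n (n is always ≥ 0, so Nat is exact),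
-- add one, and test overflow with a right shift.  The decode loop of Source B only
-- mutates the list and never touches the return value, so it has no Lean counterpart.
def increment_operators_alt (operators : List String) : Bool :=
  let n := operators.foldl (fun a op => a * 2 + (if op = "+" then 0 else 1)) 0
  if (n + 1) >>> operators.length ≠ 0 then false else true

-- ===== PRECONDITION & SPEC =====
def Spec_increment_operators (operators : List String) (out : Bool) : Prop := out = increment_operators_alt operators
instance (operators : List String) (out : Bool) : Decidable (Spec_increment_operators operators out) := by unfold Spec_increment_operators; infer_instance

-- ===== CLAIM (what is proved, stated in full; the proofs are below) =====
def Claim_equal_increment_operators : Prop := ∀ (operators : List String), Dom_increment_operators operators → Spec_increment_operators operators (increment_operators operators)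

-- ===== LEMMAS AND PROOFS =====
-- A's backward scan returns true iff some element of the scanned prefix is "+".
theorem goA_eq_contains (ops : List String) (n : Nat) (h : n ≤ ops.length) :
    goA_increment ops n = (ops.take n).contains "+" := by
  induction n with
  | zero => simp [goA_increment]
  | succ m ih =>
    have hm : m < ops.length := h
    rw [List.take_add_one, ops.getElem?_eq_getElem hm]
    by_cases hv : ops[m] = "+"
    · simp [goA_increment, ops.getElem?_eq_getElem hm, hv]
    · have hstep : goA_increment ops (m + 1) = goA_increment ops m := by
        simp [goA_increment, ops.getElem?_eq_getElem hm, hv]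
      rw [hstep, ih hm.le, List.contains_append]
      simp
      exact fun hx => absurd hx.symm hv

-- the encoded value is always below (a+1) · 2^len
theorem foldB_lt (ops : List String) : ∀ a : Nat,
    ops.foldl (fun a op => a * 2 + (if op = "+" then 0 else 1)) a < (a + 1) * 2 ^ ops.length := by
  induction ops with
  | nil => simp
  | cons op t ih =>
    intro a
    have h := ih (a * 2 + (if op = "+" then 0 else 1))
    have hb : (if op = "+" then 0 else 1) ≤ 1 := by split <;> omega
    have hmono : (a * 2 + (if op = "+" then 0 else 1) + 1) * 2 ^ t.length
        ≤ (a + 1) * 2 ^ (t.length + 1) := by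
      rw [pow_succ]
      nlinarith [Nat.one_le_two_pow (n := t.length)]
    calc List.foldl _ _ (op :: t) = _ := rfl
      _ < (a * 2 + (if op = "+" then 0 else 1) + 1) * 2 ^ t.length := h
      _ ≤ (a + 1) * 2 ^ (t.length + 1) := hmono

-- the encoded value tops out (hits (a+1)·2^len − 1) exactly when no "+" occurs
theorem foldB_succ_eq (ops : List String) : ∀ a : Nat,
    (ops.foldl (fun a op => a * 2 + (if op = "+" then 0 else 1)) a + 1
      = (a + 1) * 2 ^ ops.length) ↔ "+" ∉ ops := by
  induction ops with
  | nil => simp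
  | cons op t ih =>
    intro a
    by_cases hv : op = "+"
    · subst hv
      constructor
      · intro heq
        exfalso
        have h := foldB_lt t (a * 2)
        have hsimp : List.foldl (fun a op => a * 2 + (if op = "+" then 0 else 1)) a ("+" :: t)
            = List.foldl (fun a op => a * 2 + (if op = "+" then 0 else 1)) (a * 2) t := by simp
        rw [hsimp, List.length_cons] at heq
        have h1 : (1 : Nat) ≤ 2 ^ t.length := Nat.one_le_two_pow
        have hp : (a + 1) * 2 ^ (t.length + 1) = (a * 2 + 2) * 2 ^ t.length := by ring
        rw [hp] at heq
        nlinarith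
      · intro hmem; exact absurd List.mem_cons_self hmem
    · have h := ih (a * 2 + (if op = "+" then 0 else 1))
      simp only [if_neg hv] at h
      have harith : (a * 2 + 1 + 1) * 2 ^ t.length = (a + 1) * 2 ^ (t.length + 1) := by ring
      rw [harith] at h
      simp only [List.foldl_cons, if_neg hv, List.length_cons, List.mem_cons]
      rw [h]
      constructor
      · intro hn hc; rcases hc with hc | hc
        · exact hv hc.symm
        · exact hn hc
      · exact fun hn hc => hn (Or.inr hc)

-- ===== VERDICT (by name: the statement is the Claim_ definition above) =====
theorem increment_operators_spec : Claim_equal_increment_operators := by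
  intro ops _
  unfold Spec_increment_operators increment_operators increment_operators_alt
  rw [goA_eq_contains ops ops.length le_rfl, List.take_length]
  set n := ops.foldl (fun a op => a * 2 + (if op = "+" then 0 else 1)) 0 with hn
  have hlt : n < 2 ^ ops.length := by simpa using foldB_lt ops 0
  have hiff : (n + 1 = 2 ^ ops.length) ↔ "+" ∉ ops := by simpa using foldB_succ_eq ops 0
  simp only [Nat.shiftRight_eq_div_pow]
  by_cases hc : "+" ∈ ops
  · have hne : n + 1 ≠ 2 ^ ops.length := fun h => (hiff.mp h) hc
    have hdiv : (n + 1) / 2 ^ ops.length = 0 := Nat.div_eq_of_lt (by omega)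
    simp [hdiv, hc]
  · have heq : n + 1 = 2 ^ ops.length := hiff.mpr hc
    have hdiv : (n + 1) / 2 ^ ops.length = 1 := by rw [heq]; exact Nat.div_self (Nat.two_pow_pos _)
    simp [hdiv, hc]
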